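-- pv_equiv track=rewrite | github.com/torvalds/linux | drivers/tty/vt/gen_ucs_fallback_table.py | organize_by_pages
-- ===== SOURCE A (Python) =====
-- from collections import defaultdict
--
-- def organize_by_pages(fallback_map):
--     """Organize the fallback mappings by their high byte (page)."""
--     # Group by high byte (page)
--     page_groups = defaultdict(list)
--     for code, fallback in fallback_map.items():
--         # Skip characters with fallback value of 0 (excluded characters)
--         if fallback == 0:
--             continue
--
--         page = code >> 8  # Get the high byte (page)
--         offset = code & 0xFF  # Get the low byte (offset within page)
--         page_groups[page].append((offset, fallback))
--
--     # Sort each page's entries by offset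
--     for page in page_groups:
--         page_groups[page].sort()
--
--     return page_groups
-- ===== SOURCE B (Python) =====
-- from collections import defaultdict
--
-- def organize_by_pages(fallback_map):
--     """Organize the fallback mappings by their high byte (page)."""
--     # Single pass: keep each page's bucket sorted as we go (insertion into
--     # sorted position), so no separate per-page sort pass is needed.
--     page_groups = defaultdict(list)
--     for code, fallback in fallback_map.items():
--         if fallback == 0:
--             continue
--         entry = (code & 0xFF, fallback)
--         bucket = page_groups[code >> 8]
--         i = 0
--         while i < len(bucket) and bucket[i] <= entry:
--             i += 1
--         bucket.insert(i, entry)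
--     return page_groups
-- ===== Notes on version B (the rewrite author's own statement) =====
-- stated objective: alternative
-- what changed: A appends each entry to its page bucket and then runs a second pass that sorts every bucket; B does a single pass that inserts each entry directly at its sorted position in the bucket, so the separate per-page sort loop disappears.
import Mathlib
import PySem

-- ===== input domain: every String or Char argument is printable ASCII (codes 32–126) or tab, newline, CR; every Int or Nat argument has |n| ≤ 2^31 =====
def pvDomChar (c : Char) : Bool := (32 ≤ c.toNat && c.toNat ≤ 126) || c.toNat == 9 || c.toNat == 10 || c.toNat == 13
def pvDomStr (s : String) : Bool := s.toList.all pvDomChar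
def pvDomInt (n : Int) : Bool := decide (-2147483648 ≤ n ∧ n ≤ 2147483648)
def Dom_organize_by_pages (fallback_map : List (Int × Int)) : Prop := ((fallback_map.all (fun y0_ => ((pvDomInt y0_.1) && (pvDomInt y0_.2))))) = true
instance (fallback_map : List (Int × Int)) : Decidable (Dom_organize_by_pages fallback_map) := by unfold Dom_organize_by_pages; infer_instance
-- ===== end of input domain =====

-- B replaces A's append-then-sort-each-page two-phase grouping by a single pass that keeps
-- every page bucket sorted via insertion at the sorted position (objective: alternative, not faster).

-- ===== PORT A =====
-- dict parameter: the assoc list is read as a Python dict (insertion order, first key position,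
-- last value wins) via PySem.Dict.ofList; the defaultdict result is returned as its items list.
def organize_by_pages (fallback_map : List (Int × Int)) : List (Int × List (Int × Int)) :=
  let d := PySem.Dict.ofList fallback_map
  -- for code, fallback in fallback_map.items(): if fallback == 0: continue; page_groups[page].append((offset, fallback))
  let page_groups :=
    d.items.foldl
      (fun g cf =>
        if cf.2 == 0 then g
        else g.modify (cf.1 >>> 8) [] (fun l => l ++ [(PySem.Int.band cf.1 255, cf.2)]))
      PySem.Dict.empty
  -- for page in page_groups: page_groups[page].sort()   (tuples sort lexicographically)
  let page_groups2 :=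
    page_groups.keys.foldl
      (fun g p => g.modify p [] (fun l => PySem.List.sorted2 l (fun e => e.1) (fun e => e.2)))
      page_groups
  page_groups2.items

-- ===== PORT B =====
-- the while-loop 'i = 0; while i < len(bucket) and bucket[i] <= entry: i += 1; bucket.insert(i, entry)'
-- as the structural recursion over the bucket (Python tuple <= on int pairs written out)
def pvInsortB (bucket : List (Int × Int)) (entry : Int × Int) : List (Int × Int) :=
  match bucket with
  | [] => [entry]
  | y :: t =>
    if y.1 < entry.1 ∨ (y.1 = entry.1 ∧ y.2 ≤ entry.2) then y :: pvInsortB t entry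
    else entry :: y :: t

def organize_by_pages_alt (fallback_map : List (Int × Int)) : List (Int × List (Int × Int)) :=
  let d := PySem.Dict.ofList fallback_map
  let page_groups :=
    d.items.foldl
      (fun g cf =>
        if cf.2 == 0 then g
        else g.modify (cf.1 >>> 8) [] (fun l => pvInsortB l (PySem.Int.band cf.1 255, cf.2)))
      PySem.Dict.empty
  page_groups.items

-- ===== PRECONDITION & SPEC =====
def Spec_organize_by_pages (fallback_map : List (Int × Int)) (out : List (Int × List (Int × Int))) : Prop := out = organize_by_pages_alt fallback_map
instance (fallback_map : List (Int × Int)) (out : List (Int × List (Int × Int))) : Decidable (Spec_organize_by_pages fallback_map out) := by unfold Spec_organize_by_pages; infer_instance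

-- ===== CLAIM (what is proved, stated in full; the proofs are below) =====
def Claim_equal_organize_by_pages : Prop := ∀ (fallback_map : List (Int × Int)), Dom_organize_by_pages fallback_map → Spec_organize_by_pages fallback_map (organize_by_pages fallback_map)

-- ===== LEMMAS AND PROOFS =====

-- B's sorted insertion agrees with the insertion step of PySem's Python sort
theorem pvInsortB_eq_insertBy (l : List (Int × Int)) (x : Int × Int) :
    pvInsortB l x =
      PySem.List.insertBy
        (fun a b : Int × Int => decide (a.1 < b.1) || (!decide (b.1 < a.1) && decide (a.2 < b.2))) x l := by
  induction l with
  | nil => rfl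
  | cons y t ih =>
    simp only [pvInsortB, PySem.List.insertBy]
    by_cases h : y.1 < x.1 ∨ (y.1 = x.1 ∧ y.2 ≤ x.2)
    · rw [if_pos h, ih, if_neg]
      simp only [Bool.or_eq_true, Bool.and_eq_true, Bool.not_eq_true', decide_eq_true_eq,
        decide_eq_false_iff_not]
      omega
    · rw [if_neg h, if_pos]
      simp only [Bool.or_eq_true, Bool.and_eq_true, Bool.not_eq_true', decide_eq_true_eq,
        decide_eq_false_iff_not]
      omega

-- Python's stable sort of a bucket is the fold of B's sorted insertions
theorem sorted2_eq_foldl_pvInsortB (l : List (Int × Int)) :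
    PySem.List.sorted2 l (fun e => e.1) (fun e => e.2) = l.foldl pvInsortB [] := by
  simp only [PySem.List.sorted2, if_neg (by decide : ¬ (false = true))]
  induction l using List.reverseRecOn with
  | nil => rfl
  | append_singleton t x ih => simp [List.foldl_append, ih, pvInsortB_eq_insertBy]

-- getD through B's grouping fold: the bucket at c is the insort-fold of c's entries
theorem getD_foldl_modify_insort (M : List (Int × (Int × Int))) (d : PySem.Dict Int (List (Int × Int))) (c : Int) :
    (M.foldl (fun g p => g.modify p.1 [] (fun l => pvInsortB l p.2)) d).getD c [] =
      ((M.filter (fun p => p.1 == c)).map (fun p => p.2)).foldl pvInsortB (d.getD c []) := by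
  induction M generalizing d with
  | nil => rfl
  | cons p t ih =>
    simp only [List.foldl_cons, ih, List.filter_cons]
    by_cases h : p.1 = c
    · simp [h]
    · have hc : ¬ c = p.1 := fun hc => h hc.symm
      simp [PySem.Dict.getD_modify, hc, beq_eq_false_iff_ne.mpr h]

-- getD through A's per-page sort pass over a Nodup key list
theorem getD_foldl_sortAll (f : List (Int × Int) → List (Int × Int)) (ks : List Int)
    (hk : ks.Nodup) (g : PySem.Dict Int (List (Int × Int))) (q : Int) :
    (ks.foldl (fun g p => g.modify p [] f) g).getD q [] =
      if q ∈ ks then f (g.getD q []) else g.getD q [] := by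
  induction ks generalizing g with
  | nil => simp
  | cons p t ih =>
    simp only [List.foldl_cons]
    rcases List.nodup_cons.mp hk with ⟨hp, ht⟩
    rw [ih ht]
    by_cases hqt : q ∈ t
    · have hqp : q ≠ p := fun h => hp (h ▸ hqt)
      simp [hqt, PySem.Dict.getD_modify, hqp, List.mem_cons]
    · simp only [hqt, if_false, PySem.Dict.getD_modify, List.mem_cons]
      by_cases hqp : q = p <;> simp [hqp]

-- Set.update of a Nodup list by itself is itself
theorem set_update_self (ks : List Int) (_hk : ks.Nodup) : PySem.Set.update ks ks = ks := by
  rw [PySem.Set.update_eq_append_filter]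
  have h1 : List.filter (fun y => !PySem.Set.contains ks y) (PySem.Set.ofList ks) = [] := by
    rw [List.filter_eq_nil_iff]
    intro a ha
    simp only [pysem] at ha ⊢
    simpa using ha
  rw [h1, List.append_nil]

-- 'if fallback == 0: continue' turns the loop into a fold over the filtered item list
theorem foldl_skip_zero {δ : Type} (f : δ → (Int × Int) → δ) (l : List (Int × Int)) (e : δ) :
    l.foldl (fun g cf => if cf.2 == 0 then g else f g cf) e
      = (l.filter (fun cf => !(cf.2 == 0))).foldl f e := by
  rw [← PySem.List.foldl_if_eq_foldl_filter]
  apply PySem.List.foldl_congr_mem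
  intro acc x _
  cases h : x.2 == 0 <;> simp

theorem organize_by_pages_eq (fallback_map : List (Int × Int)) :
    organize_by_pages fallback_map = organize_by_pages_alt fallback_map := by
  unfold organize_by_pages organize_by_pages_alt
  simp only [foldl_skip_zero]
  set L := ((PySem.Dict.ofList fallback_map).items.filter (fun cf => !(cf.2 == 0))) with hL
  set M := L.map (fun cf : Int × Int => ((cf.1 >>> 8 : Int), (PySem.Int.band cf.1 255, cf.2))) with hM
  have hGM : L.foldl
      (fun g cf => g.modify (cf.1 >>> 8) [] (fun l => l ++ [(PySem.Int.band cf.1 255, cf.2)]))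
      PySem.Dict.empty
      = M.foldl (fun g p => g.modify p.1 [] (fun l => l ++ [p.2])) PySem.Dict.empty := by
    rw [hM, List.foldl_map]
  have hHM : L.foldl
      (fun g cf => g.modify (cf.1 >>> 8) [] (fun l => pvInsortB l (PySem.Int.band cf.1 255, cf.2)))
      PySem.Dict.empty
      = M.foldl (fun g p => g.modify p.1 [] (fun l => pvInsortB l p.2)) PySem.Dict.empty := by
    rw [hM, List.foldl_map]
  rw [hGM, hHM]
  set G := M.foldl (fun g p => g.modify p.1 [] (fun l => l ++ [p.2])) PySem.Dict.empty with hG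
  set H := M.foldl (fun g p => g.modify p.1 [] (fun l => pvInsortB l p.2)) PySem.Dict.empty with hH
  -- same key list, in the same order, on both sides
  have hkeys : G.keys = H.keys := by
    rw [hG, hH]
    simp only [PySem.Dict.keys_foldl_modify_key]
  have hndG : G.keys.Nodup := by
    rw [hG]
    exact PySem.Dict.nodup_keys_foldl_modify_key M (fun p => p.1) []
      (fun _ p => fun l => l ++ [p.2]) PySem.Dict.empty (by simp)
  have hndH : H.keys.Nodup := hkeys ▸ hndG
  have hbG : ∀ q, G.getD q [] = (M.filter (fun p => p.1 == q)).map (fun p => p.2) := by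
    intro q
    rw [hG, PySem.Dict.getD_foldl_modify_append]
    simp
  have hbH : ∀ q, H.getD q [] =
      ((M.filter (fun p => p.1 == q)).map (fun p => p.2)).foldl pvInsortB [] := by
    intro q
    rw [hH, getD_foldl_modify_insort]
    simp
  set S := G.keys.foldl
      (fun g p => g.modify p [] (fun l => PySem.List.sorted2 l (fun e => e.1) (fun e => e.2))) G
    with hS
  have hSkeys : S.keys = G.keys := by
    rw [hS]
    simp only [PySem.Dict.keys_foldl_modify_key, List.map_id_fun',
      PySem.Set.update]
    exact set_update_self G.keys hndG
  have hSnd : S.keys.Nodup := hSkeys ▸ hndG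
  rw [PySem.Dict.items_eq_map_keys S hSnd [], PySem.Dict.items_eq_map_keys H hndH [],
      hSkeys, hkeys]
  apply List.map_congr_left
  intro k hk
  have hkG : k ∈ G.keys := hkeys ▸ hk
  rw [hS, getD_foldl_sortAll _ G.keys hndG G k, if_pos hkG, hbG k, hbH k,
      sorted2_eq_foldl_pvInsortB]

-- ===== VERDICT (by name: the statement is the Claim_ definition above) =====
theorem organize_by_pages_spec : Claim_equal_organize_by_pages := by
  intro fm _
  unfold Spec_organize_by_pages
  exact organize_by_pages_eq fm
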